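-- pv_equiv track=rewrite | github.com/42-codingtest-study/week-27 | pc2_공간.py | best_list
-- ===== SOURCE A (Python) =====
-- def best_list(same_per, dic) :
--     high = 0
--     who = []
--     for i in range(len(same_per)) :
--         if high < dic[same_per[i]] :
--             who = []
--             high = dic[same_per[i]]
--             who.append(same_per[i])
--         elif high == dic[same_per[i]] :
--             who.append(same_per[i])
--         else :
--             continue
--     return  who
-- ===== SOURCE B (Python) =====
-- def best_list(same_per, dic):
--     if not same_per:
--         return []
--     m = max(max(dic[x] for x in same_per), 0)
--     return [x for x in same_per if dic[x] == m]
-- ===== Notes on version B (the rewrite author's own statement) =====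
-- stated objective: simpler
-- what changed: Replaces the one-pass running-max/reset argmax loop with a two-pass max-then-filter decomposition (compute the target value clamped at A's 0 baseline, then keep matching elements).
import Mathlib
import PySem

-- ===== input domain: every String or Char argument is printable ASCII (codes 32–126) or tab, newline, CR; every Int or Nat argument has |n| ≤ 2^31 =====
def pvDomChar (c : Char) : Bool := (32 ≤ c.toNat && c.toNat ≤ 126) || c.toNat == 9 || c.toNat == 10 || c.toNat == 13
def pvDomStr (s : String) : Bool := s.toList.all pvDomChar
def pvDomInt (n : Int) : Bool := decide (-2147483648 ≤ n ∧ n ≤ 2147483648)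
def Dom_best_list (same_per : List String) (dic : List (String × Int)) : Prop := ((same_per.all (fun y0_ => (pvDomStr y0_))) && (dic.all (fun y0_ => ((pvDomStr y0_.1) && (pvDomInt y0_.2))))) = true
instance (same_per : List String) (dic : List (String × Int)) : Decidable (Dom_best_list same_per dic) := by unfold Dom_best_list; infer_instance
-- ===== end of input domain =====

-- B is a simpler two-pass max-then-filter decomposition of A's one-pass running-max loop; equal return value on Pre_ (all keys present).

-- ===== PORT A =====
-- dic[k]: first-match association-list lookup (Python dict lookup); total form, Pre_ guarantees the key is present
def pvLookup (dic : List (String × Int)) (k : String) : Int := (dic.lookup k).getD 0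

def best_list (same_per : List String) (dic : List (String × Int)) : List String :=
  -- high = 0; who = []; for i in range(len(same_per)): …
  ((PySem.List.pyRange 0 (PySem.List.len same_per) 1).foldl
    (fun (s : Int × List String) i =>
      if s.1 < pvLookup dic (PySem.List.pyGetD same_per i "") then (pvLookup dic (PySem.List.pyGetD same_per i ""), [PySem.List.pyGetD same_per i ""])
      else if s.1 = pvLookup dic (PySem.List.pyGetD same_per i "") then (s.1, s.2 ++ [PySem.List.pyGetD same_per i ""])
      else s)
    ((0 : Int), ([] : List String))).2

-- ===== PORT B =====
def best_list_alt (same_per : List String) (dic : List (String × Int)) : List String :=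
  if same_per = [] then []
  else
    have m := max ((PySem.List.max? (same_per.map (fun x => pvLookup dic x)) (fun y => y)).getD 0) 0
    same_per.filter (fun x => pvLookup dic x == m)

-- ===== PRECONDITION & SPEC =====
-- Pre_ excludes exactly the inputs where some element of same_per is not a key of dic (Python A raises KeyError there).
def Pre_best_list (same_per : List String) (dic : List (String × Int)) : Prop :=
  ∀ x ∈ same_per, (dic.lookup x).isSome
instance (same_per : List String) (dic : List (String × Int)) : Decidable (Pre_best_list same_per dic) := by unfold Pre_best_list; infer_instance
def pvWitness_best_list : List String × (List (String × Int)) := (["a", "b", "c"], [("a", 2), ("b", 2), ("c", -1)])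

def Spec_best_list (same_per : List String) (dic : List (String × Int)) (out : List String) : Prop := out = best_list_alt same_per dic
instance (same_per : List String) (dic : List (String × Int)) (out : List String) : Decidable (Spec_best_list same_per dic out) := by unfold Spec_best_list; infer_instance

-- ===== CLAIM (what is proved, stated in full; the proofs are below) =====
def Claim_equal_best_list : Prop := ∀ (same_per : List String) (dic : List (String × Int)), Dom_best_list same_per dic → Pre_best_list same_per dic → Spec_best_list same_per dic (best_list same_per dic)

-- ===== LEMMAS AND PROOFS =====

-- running maximum of looked-up values, starting from h
def pvM (dic : List (String × Int)) (l : List String) (h : Int) : Int :=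
  l.foldl (fun a x => max a (pvLookup dic x)) h

theorem pvM_le (dic : List (String × Int)) (l : List String) (h : Int) : h ≤ pvM dic l h := by
  induction l generalizing h with
  | nil => simp [pvM]
  | cons x t ih =>
    have := ih (max h (pvLookup dic x))
    simp only [pvM, List.foldl_cons] at *
    exact le_trans (le_max_left _ _) this

-- A's loop computes (running max, filter of the prefix at that max)
theorem foldA (dic : List (String × Int)) (l : List String) (h : Int) (w : List String) :
    l.foldl (fun (s : Int × List String) x =>
      if s.1 < pvLookup dic x then (pvLookup dic x, [x])
      else if s.1 = pvLookup dic x then (s.1, s.2 ++ [x])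
      else s) (h, w)
    = (pvM dic l h, (if pvM dic l h = h then w else []) ++ l.filter (fun x => pvLookup dic x == pvM dic l h)) := by
  induction l generalizing h w with
  | nil => simp [pvM]
  | cons x t ih =>
    simp only [List.foldl_cons, List.filter_cons]
    have hM : pvM dic (x :: t) h = pvM dic t (max h (pvLookup dic x)) := by
      simp [pvM]
    by_cases h1 : h < pvLookup dic x
    · have hmax : max h (pvLookup dic x) = pvLookup dic x := max_eq_right (le_of_lt h1)
      have hle : pvLookup dic x ≤ pvM dic t (pvLookup dic x) := pvM_le dic t _
      have hne : pvM dic (x :: t) h ≠ h := by rw [hM, hmax]; omega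
      simp only [if_pos h1, ih, hM, hmax]
      by_cases h2 : pvM dic t (pvLookup dic x) = pvLookup dic x
      · simp [h2]
        intro he; exact absurd he (by omega)
      · have : ¬ (pvLookup dic x == pvM dic t (pvLookup dic x)) := by
          simp [beq_iff_eq]; omega
        simp [h2, this]
        intro he; exact absurd he (by omega)
    · have hmax : max h (pvLookup dic x) = h := max_eq_left (by omega)
      by_cases h2 : h = pvLookup dic x
      · simp only [if_neg h1, if_pos h2, ih, hM, hmax]
        by_cases h3 : pvM dic t h = h
        · have : (pvLookup dic x == pvM dic t h) = true := by
            simp [beq_iff_eq]; omega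
          simp [h3]
          omega
        · have : ¬ (pvLookup dic x == pvM dic t h) = true := by
            simp [beq_iff_eq]
            intro he; exact h3 (by omega)
          simp [h3, this]
      · simp only [if_neg h1, if_neg h2, ih, hM, hmax]
        have hlt : pvLookup dic x < h := by omega
        have hle : h ≤ pvM dic t h := pvM_le dic t h
        have : ¬ (pvLookup dic x == pvM dic t h) = true := by
          simp [beq_iff_eq]; omega
        simp [this]

theorem foldl_max_pull (l : List Int) (a b : Int) :
    l.foldl max (max a b) = max a (l.foldl max b) := by
  induction l generalizing b with
  | nil => simp
  | cons x t ih =>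
    simp only [List.foldl_cons]
    rw [max_assoc, ih]

-- B's clamped max equals A's running max started at 0, on nonempty input
theorem m_eq (dic : List (String × Int)) (x : String) (t : List String) :
    max ((PySem.List.max? ((x :: t).map (fun y => pvLookup dic y)) (fun y => y)).getD 0) 0
      = pvM dic (x :: t) 0 := by
  rw [List.map_cons, PySem.List.max?_id_cons]
  simp only [Option.getD_some, pvM, List.foldl_cons]
  have e1 : t.foldl (fun a y => max a (pvLookup dic y)) (max 0 (pvLookup dic x))
      = (t.map (fun y => pvLookup dic y)).foldl max (max 0 (pvLookup dic x)) := by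
    simp [List.foldl_map]
  have e2 := foldl_max_pull (t.map (fun y => pvLookup dic y)) 0 (pvLookup dic x)
  rw [e1, e2, max_comm]

-- ===== VERDICT (by name: the statement is the Claim_ definition above) =====
theorem best_list_spec : Claim_equal_best_list := by
  intro same_per dic _ _
  unfold Spec_best_list best_list best_list_alt
  rw [PySem.List.foldl_pyRange_zero_pyGetD same_per ""
    (fun (s : Int × List String) x =>
      if s.1 < pvLookup dic x then (pvLookup dic x, [x])
      else if s.1 = pvLookup dic x then (s.1, s.2 ++ [x])
      else s)
    ((0 : Int), ([] : List String))]
  rw [foldA]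
  cases same_per with
  | nil => simp
  | cons x t =>
    simp only [if_neg (List.cons_ne_nil x t)]
    rw [m_eq]
    simp [List.filter]
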